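-- pv_equiv track=rewrite | github.com/efim1222/prepareEGE | def inf 1/15.py | od
-- ===== SOURCE A (Python) =====
-- def od(n, m):
--     ndel = []
--     mdel = []
--     odinak = []
--     for i in range(2, n + 1):
--         if n % i == 0:
--             ndel.append(i)
--     for x in range(2, m + 1):
--         if m % x == 0:
--             mdel.append(x)
--     for j in ndel:
--         for k in mdel:
--             if j == k:
--                 odinak.append(j)
--     if len(odinak) >= 1:
--         return True
--     else:
--         return False
-- ===== SOURCE B (Python) =====
-- def od(n, m):
--     for i in range(2, min(n, m) + 1):
--         if n % i == 0 and m % i == 0: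
--             return True
--     return False
-- ===== Notes on version B (the rewrite author's own statement) =====
-- stated objective: faster
-- what changed: Replaced A's two materialised divisor lists plus a nested intersection loop with a single early-exit scan of i in [2, min(n, m)] testing both divisibilities at once.
import Mathlib
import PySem

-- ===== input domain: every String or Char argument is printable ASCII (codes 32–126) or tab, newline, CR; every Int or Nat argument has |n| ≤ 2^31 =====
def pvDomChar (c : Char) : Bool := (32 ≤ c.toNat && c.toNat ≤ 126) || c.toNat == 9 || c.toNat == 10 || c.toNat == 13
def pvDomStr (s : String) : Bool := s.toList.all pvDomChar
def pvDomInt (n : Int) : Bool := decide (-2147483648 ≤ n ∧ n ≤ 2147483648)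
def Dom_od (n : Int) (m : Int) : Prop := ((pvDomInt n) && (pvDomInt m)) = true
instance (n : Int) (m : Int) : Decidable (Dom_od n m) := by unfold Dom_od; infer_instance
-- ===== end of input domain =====

-- B replaces A's two materialised divisor lists plus nested intersection loop with one early-exit scan of 2..min(n,m).

-- ===== PORT A =====
-- 'for i in range(2, v+1): if v % i == 0: acc.append(i)' (range is lazy: an integer loop)
def odDivLoop (v : Int) (i : Int) (stop : Int) (acc : List Int) : List Int :=
  if i < stop then
    odDivLoop v (i + 1) stop (if PySem.Int.mod v i == 0 then acc ++ [i] else acc)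
  else acc
termination_by (stop - i).toNat
decreasing_by omega

def od (n : Int) (m : Int) : Bool :=
  let ndel := odDivLoop n 2 (n + 1) []
  let mdel := odDivLoop m 2 (m + 1) []
  let odinak := ndel.foldl
    (fun acc j => mdel.foldl (fun acc2 k => if j == k then acc2 ++ [j] else acc2) acc) []
  decide (odinak.length ≥ 1)

-- ===== PORT B =====
-- 'for i in range(2, min(n, m)+1): if n % i == 0 and m % i == 0: return True / return False'
def odScan (n : Int) (m : Int) (i : Int) (stop : Int) : Bool :=
  if i < stop then
    if PySem.Int.mod n i == 0 && PySem.Int.mod m i == 0 then true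
    else odScan n m (i + 1) stop
  else false
termination_by (stop - i).toNat
decreasing_by omega

def od_alt (n : Int) (m : Int) : Bool :=
  odScan n m 2 (min n m + 1)

-- ===== PRECONDITION & SPEC =====
def Spec_od (n : Int) (m : Int) (out : Bool) : Prop := out = od_alt n m
instance (n : Int) (m : Int) (out : Bool) : Decidable (Spec_od n m out) := by unfold Spec_od; infer_instance

-- ===== CLAIM (what is proved, stated in full; the proofs are below) =====
def Claim_equal_od : Prop := ∀ (n : Int) (m : Int), Dom_od n m → Spec_od n m (od n m)

-- ===== LEMMAS AND PROOFS =====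

theorem odDivLoop_eq_aux (v stop : Int) : ∀ (fuel : Nat) (i : Int) (acc : List Int),
    (stop - i).toNat = fuel →
    odDivLoop v i stop acc =
      acc ++ (PySem.List.pyRange i stop 1).filter (fun x => PySem.Int.mod v x == 0) := by
  intro fuel
  induction fuel with
  | zero =>
    intro i acc h
    rw [odDivLoop, if_neg (by omega), PySem.List.pyRange_one_eq_nil (by omega)]
    simp
  | succ k ih =>
    intro i acc h
    by_cases hi : i < stop
    · rw [odDivLoop, if_pos hi, ih (i + 1) _ (by omega), PySem.List.pyRange_one_cons hi,
        List.filter_cons]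
      split <;> simp
    · rw [odDivLoop, if_neg hi, PySem.List.pyRange_one_eq_nil (by omega)]
      simp

theorem odDivLoop_eq (v i stop : Int) (acc : List Int) :
    odDivLoop v i stop acc =
      acc ++ (PySem.List.pyRange i stop 1).filter (fun x => PySem.Int.mod v x == 0) :=
  odDivLoop_eq_aux v stop _ i acc rfl

theorem odScan_eq_aux (n m stop : Int) : ∀ (fuel : Nat) (i : Int),
    (stop - i).toNat = fuel →
    odScan n m i stop =
      (PySem.List.pyRange i stop 1).any
        (fun x => PySem.Int.mod n x == 0 && PySem.Int.mod m x == 0) := by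
  intro fuel
  induction fuel with
  | zero =>
    intro i h
    rw [odScan, if_neg (by omega), PySem.List.pyRange_one_eq_nil (by omega)]
    simp
  | succ k ih =>
    intro i h
    by_cases hi : i < stop
    · rw [odScan, if_pos hi, ih (i + 1) (by omega), PySem.List.pyRange_one_cons hi,
        List.any_cons]
      split <;> simp_all
    · rw [odScan, if_neg hi, PySem.List.pyRange_one_eq_nil (by omega)]
      simp

theorem od_true_iff (n m : Int) : od n m = true ↔
    ∃ i : Int, 2 ≤ i ∧ i ≤ n ∧ i ≤ m ∧ PySem.Int.mod n i = 0 ∧ PySem.Int.mod m i = 0 := by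
  simp only [od, odDivLoop_eq, List.nil_append, PySem.List.foldl_append_if,
    PySem.List.foldl_append_eq_flatMap]
  simp only [ge_iff_le, decide_eq_true_eq, Nat.one_le_iff_ne_zero, ne_eq,
    List.length_eq_zero_iff, List.flatMap_eq_nil_iff, List.map_eq_nil_iff,
    List.filter_eq_nil_iff, List.mem_filter, PySem.List.mem_pyRange_one,
    beq_iff_eq, not_forall]
  push Not
  constructor
  · rintro ⟨j, ⟨⟨hj2, hjn⟩, hjd⟩, k, ⟨⟨hk2, hkm⟩, hkd⟩, hjk⟩
    exact ⟨j, hj2, by omega, by omega, hjd, by rw [hjk]; exact hkd⟩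
  · rintro ⟨i, h2, hn, hm, hdn, hdm⟩
    exact ⟨i, ⟨⟨h2, by omega⟩, hdn⟩, i, ⟨⟨h2, by omega⟩, hdm⟩, rfl⟩

theorem od_alt_true_iff (n m : Int) : od_alt n m = true ↔
    ∃ i : Int, 2 ≤ i ∧ i ≤ n ∧ i ≤ m ∧ PySem.Int.mod n i = 0 ∧ PySem.Int.mod m i = 0 := by
  rw [od_alt, odScan_eq_aux n m (min n m + 1) _ 2 rfl]
  simp only [List.any_eq_true, PySem.List.mem_pyRange_one, Bool.and_eq_true, beq_iff_eq]
  constructor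
  · rintro ⟨i, ⟨h2, hlt⟩, hdn, hdm⟩
    exact ⟨i, h2, by omega, by omega, hdn, hdm⟩
  · rintro ⟨i, h2, hn, hm, hdn, hdm⟩
    exact ⟨i, ⟨h2, by omega⟩, hdn, hdm⟩

-- ===== VERDICT (by name: the statement is the Claim_ definition above) =====
theorem od_spec : Claim_equal_od := by
  intro n m _
  unfold Spec_od
  have h := (od_true_iff n m).trans (od_alt_true_iff n m).symm
  cases hA : od n m <;> cases hB : od_alt n m <;> simp_all
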